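-- pv_equiv track=rewrite | github.com/rabhijit/IntelliGuitar | Complete.py | mac_space
-- ===== SOURCE A (Python) =====
-- def wow(lst):
--      string = ""
--      for i in lst:
--           string += i
--      return string
--
-- def mac_space(str):
--     lst = []
--     for i in str:
--         lst.append(i)
--     for j in range(len(lst)):
--         if lst[j] == " ":
--             lst = lst[:j] + ["\ "] + lst[j+1:]
--     return wow(lst)
-- ===== SOURCE B (Python) =====
-- def mac_space(str):
--     return "\\ ".join(str.split(" "))
-- ===== Notes on version B (the rewrite author's own statement) =====
-- stated objective: faster
-- what changed: Replaces A's char-by-char list build plus per-space whole-list splicing and string-concatenation loop with a single split-on-space then join-with-escaped-space pass.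
import Mathlib
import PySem

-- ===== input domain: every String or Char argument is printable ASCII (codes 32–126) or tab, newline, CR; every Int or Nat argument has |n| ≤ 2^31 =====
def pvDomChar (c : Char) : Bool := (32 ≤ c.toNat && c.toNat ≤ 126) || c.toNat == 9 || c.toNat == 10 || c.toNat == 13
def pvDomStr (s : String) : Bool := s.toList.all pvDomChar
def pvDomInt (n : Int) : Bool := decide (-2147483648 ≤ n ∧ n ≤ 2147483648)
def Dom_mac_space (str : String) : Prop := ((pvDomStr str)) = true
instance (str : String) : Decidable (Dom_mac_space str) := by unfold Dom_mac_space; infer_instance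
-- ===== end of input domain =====

-- B replaces A's char-list build + per-space list splicing + concatenation loop by a single split(" ")/"\ ".join pass (objective: idiomatic); return value only.

-- ===== PORT A =====
-- helper 'wow': the string-concatenation loop, on strings as char lists
def pvWow (lst : List (List Char)) : List Char := lst.foldl (fun s i => s ++ i) []

def mac_space (str : String) : String :=
  let lst := str.toList.foldl (fun acc i => acc ++ [[i]]) ([] : List (List Char))
  let lst2 := (PySem.List.pyRange 0 (lst.length : Int) 1).foldl
    (fun l j =>
      if (PySem.List.pyGet? l j).getD [] = [' '] then
        PySem.List.slice l none (some j) ++ [['\\', ' ']] ++ PySem.List.slice l (some (j + 1)) none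
      else l) lst
  String.ofList (pvWow lst2)

-- ===== PORT B =====
def mac_space_alt (str : String) : String :=
  PySem.Str.join "\\ " ((PySem.Str.split? str " ").getD [])

-- ===== PRECONDITION & SPEC =====
def Spec_mac_space (str : String) (out : String) : Prop := out = mac_space_alt str
instance (str : String) (out : String) : Decidable (Spec_mac_space str out) := by unfold Spec_mac_space; infer_instance

-- ===== CLAIM (what is proved, stated in full; the proofs are below) =====
def Claim_equal_mac_space : Prop := ∀ (str : String), Dom_mac_space str → Spec_mac_space str (mac_space str)

-- ===== LEMMAS AND PROOFS =====

-- the per-character replacement both programs implement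
def pvG (c : Char) : List Char := if c = ' ' then ['\\', ' '] else [c]

theorem pvFoldl_singletons (cs : List Char) (acc : List (List Char)) :
    cs.foldl (fun acc i => acc ++ [[i]]) acc = acc ++ cs.map (fun c => [c]) := by
  induction cs generalizing acc with
  | nil => simp
  | cons c rest ih => simp [List.foldl_cons, ih]

theorem pvWow_eq_flatten (l : List (List Char)) : pvWow l = l.flatten := by
  unfold pvWow
  suffices h : ∀ (acc : List Char), l.foldl (fun s i => s ++ i) acc = acc ++ l.flatten by
    simpa using h []
  induction l with
  | nil => simp
  | cons x xs ih => intro acc; simp [List.foldl_cons, ih]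

-- A's index loop: after processing indices [pre.length, pre.length + suf.length),
-- every element is the pvG image of the original character
theorem pvLoop (suf pre : List Char) :
    (PySem.List.pyRange (pre.length : Int) ((pre.length + suf.length : Nat) : Int) 1).foldl
      (fun l j =>
        if (PySem.List.pyGet? l j).getD [] = [' '] then
          PySem.List.slice l none (some j) ++ [['\\', ' ']] ++ PySem.List.slice l (some (j + 1)) none
        else l)
      (pre.map pvG ++ suf.map (fun c => [c])) = (pre ++ suf).map pvG := by
  induction suf generalizing pre with
  | nil =>
    rw [PySem.List.pyRange_one_eq_nil (by simp)]
    simp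
  | cons c rest ih =>
    rw [PySem.List.pyRange_one_cons (by push_cast [List.length_cons]; omega), List.foldl_cons]
    have hget : (PySem.List.pyGet? (pre.map pvG ++ (c :: rest).map (fun c => [c]))
        ((pre.length : Int))).getD [] = [c] := by
      rw [PySem.List.pyGet?_natCast]
      simp
    rw [hget]
    have hrange : PySem.List.pyRange ((pre.length : Int) + 1)
        ((pre.length + (c :: rest).length : Nat) : Int) 1
        = PySem.List.pyRange (((pre ++ [c]).length : Nat) : Int)
            (((pre ++ [c]).length + rest.length : Nat) : Int) 1 := by
      congr 1 <;> push_cast [List.length_append, List.length_cons, List.length_nil] <;> omega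
    have hstart : (pre.map pvG ++ ([c].map pvG ++ rest.map (fun c => [c])))
        = (pre ++ [c]).map pvG ++ rest.map (fun c => [c]) := by
      simp
    by_cases hc : c = ' '
    · rw [if_pos (by simp [hc])]
      rw [PySem.List.slice_to _ (by positivity), PySem.List.slice_from _ (by omega)]
      have h1 : ((pre.length : Int)).toNat = pre.length := by omega
      have h2 : (((pre.length : Int)) + 1).toNat = pre.length + 1 := by omega
      rw [h1, h2]
      have htake : (pre.map pvG ++ (c :: rest).map (fun c => [c])).take pre.length
          = pre.map pvG := by
        rw [show pre.length = (pre.map pvG).length by simp, List.take_left]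
      have hdrop : (pre.map pvG ++ (c :: rest).map (fun c => [c])).drop (pre.length + 1)
          = rest.map (fun c => [c]) := by
        rw [show pre.length + 1 = (pre.map pvG).length + 1 by simp, ← List.drop_drop]
        simp
      rw [htake, hdrop, hrange]
      rw [show pre.map pvG ++ [['\\', ' ']] ++ rest.map (fun c => [c])
          = pre.map pvG ++ ([c].map pvG ++ rest.map (fun c => [c])) by simp [pvG, hc]]
      rw [hstart, ih (pre ++ [c])]
      simp
    · rw [if_neg (by simp [hc])]
      rw [hrange]
      rw [show pre.map pvG ++ (c :: rest).map (fun c => [c])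
          = pre.map pvG ++ ([c].map pvG ++ rest.map (fun c => [c])) by simp [pvG, hc]]
      rw [hstart, ih (pre ++ [c])]
      simp

theorem mac_space_eq_flatMap (str : String) :
    mac_space str = String.ofList (str.toList.flatMap pvG) := by
  unfold mac_space
  rw [pvFoldl_singletons]
  simp only [List.nil_append, List.length_map]
  have := pvLoop str.toList []
  simp only [List.map_nil, List.nil_append, List.length_nil, Nat.zero_add,
    Nat.cast_zero] at this
  rw [this, pvWow_eq_flatten, List.flatten_eq_flatMap, List.flatMap_map]
  simp

-- PySem's fuel-based splitOn with sep = " " is Mathlib's List.splitOn ' '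
theorem pvGo (fuel : Nat) (l cur : List Char) (acc : List (List Char)) (h : l.length ≤ fuel) :
    PySem.Chars.splitOn.go [' '] fuel l cur acc
      = acc.reverse ++ List.modifyHead (cur.reverse ++ ·) (List.splitOn ' ' l) := by
  induction fuel generalizing l cur acc with
  | zero =>
    have hl : l = [] := List.eq_nil_of_length_eq_zero (Nat.le_zero.mp h)
    subst hl
    simp [PySem.Chars.splitOn.go, List.splitOn, List.splitOnP_nil]
  | succ f ih =>
    cases l with
    | nil =>
      rw [PySem.Chars.splitOn.go]
      simp [List.splitOn, List.splitOnP_nil]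
      omega
    | cons c rest =>
      rw [PySem.Chars.splitOn.go]
      have hpre : [' '].isPrefixOf (c :: rest) = (c == ' ') := by
        simp [List.isPrefixOf]
        exact ⟨fun h => h.symm, fun h => h.symm⟩
      rw [hpre]
      simp only [List.length_cons] at h
      by_cases hc : c = ' '
      · rw [if_pos (by simp [hc])]
        rw [ih _ _ _ (by simpa using Nat.le_of_succ_le_succ h)]
        rw [show List.splitOn ' ' (c :: rest) = [] :: List.splitOn ' ' rest by
          simp [List.splitOn, List.splitOnP_cons, hc]]
        obtain ⟨q, qs, hq⟩ := List.exists_cons_of_ne_nil (List.splitOnP_ne_nil (· == ' ') rest)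
        have hq' : List.splitOn ' ' rest = q :: qs := hq
        rw [hq']
        simp [hq']
      · rw [if_neg (by simp [hc])]
        rw [ih _ _ _ (Nat.le_of_succ_le_succ h)]
        rw [show List.splitOn ' ' (c :: rest)
            = List.modifyHead (List.cons c) (List.splitOn ' ' rest) by
          simp [List.splitOn, List.splitOnP_cons, hc]]
        obtain ⟨q, qs, hq⟩ := List.exists_cons_of_ne_nil (List.splitOnP_ne_nil (· == ' ') rest)
        rw [show rest.splitOn ' ' = List.splitOnP (· == ' ') rest from rfl, hq]
        simp

theorem pvSplitOn_eq (cs : List Char) :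
    PySem.Chars.splitOn cs [' '] = List.splitOn ' ' cs := by
  rw [PySem.Chars.splitOn, pvGo _ _ _ _ (by omega)]
  cases List.splitOn ' ' cs <;> simp

theorem pvIntercalate_cons_head (sep q : List Char) (c : Char) (qs : List (List Char)) :
    List.intercalate sep ((c :: q) :: qs) = c :: List.intercalate sep (q :: qs) := by
  cases qs <;> simp [List.intercalate]

theorem pvJoin_splitOn (cs : List Char) :
    List.intercalate ['\\', ' '] (List.splitOn ' ' cs) = cs.flatMap pvG := by
  induction cs with
  | nil =>
    rw [show List.splitOn ' ' ([]:List Char) = [[]] by simp [List.splitOn, List.splitOnP_nil]]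
    simp [List.intercalate]
  | cons c rest ih =>
    obtain ⟨q, qs, hq⟩ := List.exists_cons_of_ne_nil (List.splitOnP_ne_nil (· == ' ') rest)
    by_cases hc : c = ' '
    · rw [show List.splitOn ' ' (c :: rest) = [] :: List.splitOn ' ' rest by
        simp [List.splitOn, List.splitOnP_cons, hc]]
      rw [show rest.splitOn ' ' = List.splitOnP (· == ' ') rest from rfl, hq] at ih ⊢
      rw [show List.intercalate ['\\', ' '] ([] :: q :: qs)
          = ['\\', ' '] ++ List.intercalate ['\\', ' '] (q :: qs) by simp [List.intercalate]]
      rw [ih]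
      simp [pvG, hc]
    · rw [show List.splitOn ' ' (c :: rest)
          = List.modifyHead (List.cons c) (List.splitOn ' ' rest) by
        simp [List.splitOn, List.splitOnP_cons, hc]]
      rw [show rest.splitOn ' ' = List.splitOnP (· == ' ') rest from rfl, hq] at ih ⊢
      simp only [List.modifyHead]
      rw [pvIntercalate_cons_head, ih]
      simp [pvG, hc]

theorem mac_space_alt_eq_flatMap (str : String) :
    mac_space_alt str = String.ofList (str.toList.flatMap pvG) := by
  unfold mac_space_alt
  simp only [PySem.Str.split?, PySem.Str.join, PySem.Chars.split?, PySem.Chars.join]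
  rw [show (" " : String).toList = [' '] from by decide,
      show ("\\ " : String).toList = ['\\', ' '] from by decide]
  simp only [List.isEmpty_cons, if_neg Bool.false_ne_true, Option.map_some, Option.getD_some]
  rw [pvSplitOn_eq, List.map_map]
  rw [show (String.toList ∘ String.ofList) = id from funext (fun l => by simp)]
  rw [List.map_id, pvJoin_splitOn]

-- ===== VERDICT (by name: the statement is the Claim_ definition above) =====
theorem mac_space_spec : Claim_equal_mac_space := by
  intro str _
  unfold Spec_mac_space
  rw [mac_space_eq_flatMap, mac_space_alt_eq_flatMap]
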